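-- pv_equiv track=rewrite | github.com/VirJenDB/VizAvalanche | api.py | _break_names
-- ===== SOURCE A (Python) =====
-- def _break_names(list_of_tuples):
--     renamed_tuples = []
--     for tuple in list_of_tuples:
--         name = tuple[0]
--         mid = len(name) // 2
--         if mid < 7:
--             # name already short
--             tup = ('<sup>'+name+'</sup>',tuple[1])
--             renamed_tuples.append(tup)
--             continue
--         left = name.rfind(' ', 0, mid+1)
--         right = name.find(' ', mid)
--         if left == -1 and right == -1:
--             # No spaces found
--             tup = ('<sub>'+name+'</sub>',tuple[1])
--             renamed_tuples.append(tup)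
--             continue
--
--         if left == -1 or (right != -1 and (right - mid) < (mid - left)):
--             # Only right or closer right
--             split_idx = right
--         else:
--             split_idx = left
--         tup = ('<sub>'+name[:split_idx]+'</sub><br><sup>'+name[split_idx+1:]+'</sup>',tuple[1])
--         renamed_tuples.append(tup)
--     return renamed_tuples
-- ===== SOURCE B (Python) =====
-- def _fmt(name):
--     mid = len(name) // 2
--     if mid < 7:
--         return '<sup>' + name + '</sup>'
--     spaces = [i for i, c in enumerate(name) if c == ' ']
--     if not spaces:
--         return '<sub>' + name + '</sub>'
--     k = min(spaces, key=lambda i: abs(i - mid))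
--     return '<sub>' + name[:k] + '</sub><br><sup>' + name[k + 1:] + '</sup>'
--
--
-- def _break_names(list_of_tuples):
--     return [(_fmt(name), value) for name, value in list_of_tuples]
-- ===== Notes on version B (the rewrite author's own statement) =====
-- stated objective: simpler
-- what changed: Replaces the rfind/find pair and the four-way -1 branch logic with one comprehension collecting all space indices and a single min(..., key=abs(i-mid)) whose first-minimum tie-break reproduces A's left bias; the loop body becomes a small helper and the outer loop a comprehension.
import Mathlib
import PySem

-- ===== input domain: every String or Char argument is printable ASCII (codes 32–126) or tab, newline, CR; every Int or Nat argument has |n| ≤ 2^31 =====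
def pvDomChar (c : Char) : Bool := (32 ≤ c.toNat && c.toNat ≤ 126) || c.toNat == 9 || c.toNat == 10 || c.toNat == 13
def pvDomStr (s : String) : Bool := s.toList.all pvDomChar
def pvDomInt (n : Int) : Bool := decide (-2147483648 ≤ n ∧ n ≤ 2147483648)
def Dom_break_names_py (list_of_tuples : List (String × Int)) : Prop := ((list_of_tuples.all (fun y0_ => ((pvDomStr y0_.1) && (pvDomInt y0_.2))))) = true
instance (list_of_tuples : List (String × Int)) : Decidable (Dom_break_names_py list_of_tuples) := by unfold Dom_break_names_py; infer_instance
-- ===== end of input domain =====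

-- B replaces A's rfind/find pair and -1 branch logic by collecting all space indices and taking
-- the first minimiser of |i - mid| (objective: simpler); string '+' is ported as list append under
-- String.ofList and str slicing/searching via PySem (exact on the domain).

-- ===== PORT A =====
-- loop body of A, named so the foldl below is the loop
def pvStepA (renamed_tuples : List (String × Int)) (tuple : String × Int) : List (String × Int) :=
  let name := tuple.1
  let mid : Int := PySem.Int.floordiv (PySem.Str.len name) 2
  if mid < 7 then
    renamed_tuples ++ [(String.ofList ("<sup>".toList ++ name.toList ++ "</sup>".toList), tuple.2)]
  else
    let left := PySem.Str.rfindFrom name " " 0 (some (mid + 1))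
    let right := PySem.Str.findFrom name " " mid none
    if left = -1 ∧ right = -1 then
      renamed_tuples ++ [(String.ofList ("<sub>".toList ++ name.toList ++ "</sub>".toList), tuple.2)]
    else
      let split_idx := if left = -1 ∨ (right ≠ -1 ∧ right - mid < mid - left) then right else left
      renamed_tuples ++
        [(String.ofList ("<sub>".toList ++ PySem.List.slice name.toList none (some split_idx) ++
            "</sub><br><sup>".toList ++ PySem.List.slice name.toList (some (split_idx + 1)) none ++
            "</sup>".toList), tuple.2)]

def break_names_py (list_of_tuples : List (String × Int)) : List (String × Int) :=
  list_of_tuples.foldl pvStepA []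

-- ===== PORT B =====
-- B's helper _fmt
def pvFmtB (name : String) : String :=
  let mid : Int := PySem.Int.floordiv (PySem.Str.len name) 2
  if mid < 7 then
    String.ofList ("<sup>".toList ++ name.toList ++ "</sup>".toList)
  else
    let spaces := ((PySem.List.enumerate name.toList).filter (fun p => p.2 == ' ')).map (fun p => p.1)
    if spaces = [] then
      String.ofList ("<sub>".toList ++ name.toList ++ "</sub>".toList)
    else
      let k := (PySem.List.min? spaces (fun i => |i - mid|)).getD 0
      String.ofList ("<sub>".toList ++ PySem.List.slice name.toList none (some k) ++
        "</sub><br><sup>".toList ++ PySem.List.slice name.toList (some (k + 1)) none ++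
        "</sup>".toList)

def break_names_py_alt (list_of_tuples : List (String × Int)) : List (String × Int) :=
  list_of_tuples.map (fun t => (pvFmtB t.1, t.2))

-- ===== PRECONDITION & SPEC =====
def Spec_break_names_py (list_of_tuples : List (String × Int)) (out : List (String × Int)) : Prop := out = break_names_py_alt list_of_tuples
instance (list_of_tuples : List (String × Int)) (out : List (String × Int)) : Decidable (Spec_break_names_py list_of_tuples out) := by unfold Spec_break_names_py; infer_instance

-- ===== CLAIM (what is proved, stated in full; the proofs are below) =====
def Claim_equal_break_names_py : Prop := ∀ (list_of_tuples : List (String × Int)), Dom_break_names_py list_of_tuples → Spec_break_names_py list_of_tuples (break_names_py list_of_tuples)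

-- ===== LEMMAS AND PROOFS =====

lemma pvSingletonPrefix (c : Char) (l : List Char) : [c] <+: l ↔ l.head? = some c := by
  constructor
  · rintro ⟨t, rfl⟩; rfl
  · cases l with
    | nil => simp
    | cons h t => rintro h1; simp at h1; subst h1; exact ⟨t, rfl⟩

lemma pvSingletonInfix (c : Char) (l : List Char) : [c] <:+: l ↔ c ∈ l := by
  constructor
  · rintro ⟨s, t, rfl⟩; simp
  · intro h
    obtain ⟨s, t, rfl⟩ := List.append_of_mem h
    exact ⟨s, t, by simp⟩

lemma pvIsPrefixOfSingleton (c : Char) (l : List Char) :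
    List.isPrefixOf [c] l = true ↔ l.head? = some c := by
  rw [List.isPrefixOf_iff_prefix, pvSingletonPrefix]

lemma pvFloordivTwo (n : Nat) : PySem.Int.floordiv (n : Int) 2 = ((n / 2 : Nat) : Int) := by
  rw [PySem.Int.floordiv, Int.fdiv_eq_ediv]; omega

lemma pvAbsEval (x : Int) : |x| = if 0 ≤ x then x else -x := by
  rcases le_total 0 x with h | h
  · rw [if_pos h, abs_of_nonneg h]
  · by_cases h0 : 0 ≤ x
    · rw [if_pos h0, abs_of_nonneg h0]
    · rw [if_neg h0, abs_of_nonpos h]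

lemma pvRfindGoSpec (s : List Char) (c : Char) (j : Nat) :
    (PySem.Chars.rfind.go s [c] j = -1 ∧ ∀ i : Nat, i ≤ j → s[i]? ≠ some c) ∨
    (∃ i : Nat, i ≤ j ∧ PySem.Chars.rfind.go s [c] j = (i : Int) ∧ s[i]? = some c ∧
      ∀ i' : Nat, i < i' → i' ≤ j → s[i']? ≠ some c) := by
  induction j with
  | zero =>
      rw [PySem.Chars.rfind.go]
      by_cases h : List.isPrefixOf [c] s = true
      · right
        refine ⟨0, le_refl _, by simp [h], ?_, by omega⟩
        have := (pvIsPrefixOfSingleton c s).mp h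
        rwa [List.head?_eq_getElem?] at this
      · left
        refine ⟨by simp [h], ?_⟩
        intro i hi; interval_cases i
        intro hc
        exact h ((pvIsPrefixOfSingleton c s).mpr (by rwa [List.head?_eq_getElem?]))
  | succ j ih =>
      have hstep : PySem.Chars.rfind.go s [c] (j + 1) =
          if List.isPrefixOf [c] (s.drop (j + 1)) then ((j : Int) + 1) else PySem.Chars.rfind.go s [c] j := by
        rw [PySem.Chars.rfind.go]; push_cast; ring_nf
      by_cases h : List.isPrefixOf [c] (s.drop (j + 1)) = true
      · right
        refine ⟨j + 1, le_refl _, by rw [hstep, if_pos h]; push_cast; ring, ?_, by omega⟩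
        have := (pvIsPrefixOfSingleton c _).mp h
        rwa [List.head?_drop] at this
      · have hnone : s[j + 1]? ≠ some c := by
          intro hc
          exact h ((pvIsPrefixOfSingleton c _).mpr (by rwa [List.head?_drop]))
        rcases ih with ⟨h1, h2⟩ | ⟨i, hi, h1, h2, h3⟩
        · left
          refine ⟨by rw [hstep, if_neg h]; exact h1, ?_⟩
          intro i hi
          rcases Nat.lt_or_ge i (j + 1) with hlt | hge
          · exact h2 i (by omega)
          · have : i = j + 1 := by omega
            subst this; exact hnone
        · right
          refine ⟨i, by omega, by rw [hstep, if_neg h]; exact h1, h2, ?_⟩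
          intro i' hi1 hi2
          rcases Nat.lt_or_ge i' (j + 1) with hlt | hge
          · exact h3 i' hi1 (by omega)
          · have : i' = j + 1 := by omega
            subst this; exact hnone

-- min? of a nonempty list is a running fold from the head
lemma pvMinCons {α : Type} (key : α → Int) (x : α) (xs : List α) :
    PySem.List.min? (x :: xs) key = some (xs.foldl (fun m y => if key y < key m then y else m) x) := by
  show List.foldl _ (some x) xs = _
  induction xs generalizing x with
  | nil => rfl
  | cons y t ih =>
      simp only [List.foldl_cons]
      by_cases h : key y < key x <;> simp [h, ih]

-- the running min with strict comparison returns the first (= least, on a sorted list) minimiser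
lemma pvFoldlMinEq (key : Int → Int) (xs : List Int) (m c : Int)
    (hmem : c = m ∨ c ∈ xs)
    (hall : ∀ y, (y = m ∨ y ∈ xs) → key c ≤ key y ∧ (key y = key c → c ≤ y))
    (hlt : ∀ y ∈ xs, m < y) (hsort : xs.Pairwise (· < ·)) :
    xs.foldl (fun m y => if key y < key m then y else m) m = c := by
  induction xs generalizing m with
  | nil =>
      rcases hmem with rfl | h
      · simp
      · simp at h
  | cons x t ih =>
      simp only [List.foldl_cons]
      rcases List.pairwise_cons.mp hsort with ⟨hxt, ht⟩
      by_cases hcmp : key x < key m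
      · rw [if_pos hcmp]
        apply ih
        · rcases hmem with rfl | hmem
          · exfalso; exact absurd (hall x (Or.inr (List.mem_cons_self))).1 (by omega)
          · rcases List.mem_cons.mp hmem with rfl | hct
            · exact Or.inl rfl
            · exact Or.inr hct
        · intro y hy
          rcases hy with rfl | hyt
          · exact hall y (Or.inr (List.mem_cons_self))
          · exact hall y (Or.inr (List.mem_cons_of_mem _ hyt))
        · exact hxt
        · exact ht
      · rw [if_neg hcmp]
        apply ih
        · rcases hmem with rfl | hmem
          · exact Or.inl rfl
          · rcases List.mem_cons.mp hmem with rfl | hct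
            · exfalso
              have h1 := (hall m (Or.inl rfl)).1
              have h2 := (hall m (Or.inl rfl)).2
              have hk : key m = key c := by omega
              have hcm := h2 hk
              have := hlt c (List.mem_cons_self)
              omega
            · exact Or.inr hct
        · intro y hy
          rcases hy with rfl | hyt
          · exact hall y (Or.inl rfl)
          · exact hall y (Or.inr (List.mem_cons_of_mem _ hyt))
        · intro y hy; exact hlt y (List.mem_cons_of_mem _ hy)
        · exact ht
lemma pvLeftChar (cs : List Char) (midN : Nat) (h : midN + 1 ≤ cs.length) :
    (PySem.Chars.rfindFrom cs [' '] 0 (some ((midN : Int) + 1)) = -1 ∧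
      ∀ i : Nat, i ≤ midN → cs[i]? ≠ some ' ') ∨
    (∃ lN : Nat, lN ≤ midN ∧
      PySem.Chars.rfindFrom cs [' '] 0 (some ((midN : Int) + 1)) = (lN : Int) ∧
      cs[lN]? = some ' ' ∧ ∀ i : Nat, lN < i → i ≤ midN → cs[i]? ≠ some ' ') := by
  have h1 : ¬((cs.length : Int) < (midN : Int) + 1) := by omega
  have h2 : ¬((midN : Int) + 1 < 0) := by omega
  have h3 : ¬((0 : Int) < 0) := by omega
  have h4 : ¬((midN : Int) + 1 < 0) := by omega
  have htn : ((midN : Int) + 1).toNat = midN + 1 := by omega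
  have hlen : (cs.take (midN + 1)).length = midN + 1 := by
    rw [List.length_take]; omega
  have hred : PySem.Chars.rfindFrom cs [' '] 0 (some ((midN : Int) + 1)) =
      PySem.Chars.rfind.go (cs.take (midN + 1)) [' '] (midN + 1) := by
    simp only [PySem.Chars.rfindFrom, h1, if_false, h2, h3]
    rw [htn]
    simp only [Int.toNat_zero, List.drop_zero, PySem.Chars.rfind, hlen]
    by_cases hg : PySem.Chars.rfind.go (List.take (midN + 1) cs) [' '] (midN + 1) = -1
    · simp [hg]
    · rw [if_neg hg]; ring
  rw [hred]
  rcases pvRfindGoSpec (cs.take (midN + 1)) ' ' (midN + 1) with ⟨h5, h6⟩ | ⟨i, hi, hgo, hsp, hmax⟩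
  · left
    refine ⟨h5, ?_⟩
    intro i hi hc
    refine h6 i (by omega) ?_
    rw [List.getElem?_take, if_pos (by omega)]; exact hc
  · right
    have hilt : i < midN + 1 := by
      by_contra hge
      have : i = midN + 1 := by omega
      subst this
      rw [List.getElem?_take] at hsp
      simp at hsp
    refine ⟨i, by omega, hgo, ?_, ?_⟩
    · rw [List.getElem?_take, if_pos hilt] at hsp; exact hsp
    · intro i' h1' h2' hc
      refine hmax i' h1' (by omega) ?_
      rw [List.getElem?_take, if_pos (by omega)]; exact hc

lemma pvRightCharNeg (cs : List Char) (midN : Nat) (h : midN ≤ cs.length)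
    (hne : PySem.Chars.findFrom cs [' '] (midN : Int) none = -1) :
    ∀ i : Nat, midN ≤ i → cs[i]? ≠ some ' ' := by
  have := (PySem.Chars.findFrom_natCast_eq_neg_one_iff cs [' '] midN h).mp hne
  rw [pvSingletonInfix] at this
  intro i hi hc
  apply this
  have : (cs.drop midN)[i - midN]? = some ' ' := by
    rw [List.getElem?_drop]
    rw [show midN + (i - midN) = i by omega]
    exact hc
  exact List.mem_of_getElem? this

lemma pvRightCharPos (cs : List Char) (midN : Nat) (h : midN ≤ cs.length)
    (hne : PySem.Chars.findFrom cs [' '] (midN : Int) none ≠ -1) :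
    ∃ rN : Nat, midN ≤ rN ∧ PySem.Chars.findFrom cs [' '] (midN : Int) none = (rN : Int) ∧
      cs[rN]? = some ' ' ∧ ∀ i : Nat, midN ≤ i → i < rN → cs[i]? ≠ some ' ' := by
  obtain ⟨h1, h2, h3⟩ := PySem.Chars.findFrom_natCast_spec cs [' '] midN h hne
  set r := PySem.Chars.findFrom cs [' '] (midN : Int) none with hr
  have hr0 : 0 ≤ r := le_trans (by omega) h1
  refine ⟨r.toNat, by omega, by omega, ?_, ?_⟩
  · rw [pvSingletonPrefix, List.head?_drop] at h2; exact h2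
  · intro i hi1 hi2 hc
    refine h3 i hi1 hi2 ?_
    rw [pvSingletonPrefix, List.head?_drop]; exact hc

def pvSpaces (cs : List Char) : List Int :=
  ((PySem.List.enumerate cs).filter (fun p => p.2 == ' ')).map (fun p => p.1)

lemma pvMemSpaces' (cs : List Char) (j : Int) :
    j ∈ pvSpaces cs ↔
      ∃ k : Nat, k < cs.length ∧ j = (k : Int) ∧ cs[k]? = some ' ' := by
  unfold pvSpaces
  simp only [List.mem_map, List.mem_filter, PySem.List.mem_enumerate_iff]
  constructor
  · rintro ⟨⟨a, b⟩, ⟨⟨k, hk, hp⟩, hsp⟩, rfl⟩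
    rw [Prod.mk.injEq] at hp
    refine ⟨k, hk, by simp [hp.1], ?_⟩
    rw [List.getElem?_eq_getElem hk, ← hp.2]
    simpa using hsp
  · rintro ⟨k, hk, rfl, hsp⟩
    rw [List.getElem?_eq_getElem hk] at hsp
    simp only [Option.some.injEq] at hsp
    exact ⟨((k : Int), cs[k]), ⟨⟨k, hk, by simp⟩, by simp [hsp]⟩, rfl⟩

lemma pvSpacesSorted' (cs : List Char) : (pvSpaces cs).Pairwise (· < ·) := by
  unfold pvSpaces
  rw [List.pairwise_map]
  exact List.Pairwise.filter _ (PySem.List.pairwise_lt_enumerate cs 0)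
lemma pvMinSpaces (cs : List Char) (mid c : Int)
    (hc : c ∈ pvSpaces cs)
    (hall : ∀ y ∈ pvSpaces cs, |c - mid| ≤ |y - mid| ∧ (|y - mid| = |c - mid| → c ≤ y)) :
    (PySem.List.min? (pvSpaces cs) (fun i => |i - mid|)).getD 0 = c := by
  obtain ⟨s0, rest, hcons⟩ := List.exists_cons_of_ne_nil (List.ne_nil_of_mem hc)
  rw [hcons, pvMinCons]
  have hsort := pvSpacesSorted' cs
  rw [hcons, List.pairwise_cons] at hsort
  rw [Option.getD_some]
  apply pvFoldlMinEq
  · rw [hcons, List.mem_cons] at hc; exact hc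
  · intro y hy
    apply hall
    rw [hcons, List.mem_cons]; exact hy
  · exact hsort.1
  · exact hsort.2

lemma pvStepEq (acc : List (String × Int)) (t : String × Int) :
    pvStepA acc t = acc ++ [(pvFmtB t.1, t.2)] := by
  obtain ⟨name, v⟩ := t
  have hsp : (" " : String).toList = [' '] := by decide
  simp only [pvStepA, pvFmtB, PySem.Str.len_eq, pvFloordivTwo,
    PySem.Str.rfindFrom_eq, PySem.Str.findFrom_eq, hsp]
  by_cases hm : ((name.toList.length / 2 : Nat) : Int) < 7
  · rw [if_pos hm, if_pos hm]
  · rw [if_neg hm, if_neg hm]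
    have h7 : 7 ≤ name.toList.length / 2 := by omega
    have hmn : name.toList.length / 2 + 1 ≤ name.toList.length := by omega
    have hspaces : List.map (fun p => p.1) (List.filter (fun p => p.2 == ' ')
        (PySem.List.enumerate name.toList)) = pvSpaces name.toList := rfl
    rw [hspaces]
    rcases pvLeftChar name.toList (name.toList.length / 2) hmn with
      ⟨hLeq, hLnone⟩ | ⟨lN, hlNle, hLeq, hLsp, hLmax⟩
    · -- left = -1 : no space at index ≤ mid
      rw [hLeq]
      by_cases hR : PySem.Chars.findFrom name.toList [' '] ((name.toList.length / 2 : Nat) : Int) none = -1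
      · -- no space at all
        have hRnone := pvRightCharNeg name.toList (name.toList.length / 2) (by omega) hR
        rw [hR]
        rw [if_pos ⟨rfl, rfl⟩]
        have hempty : pvSpaces name.toList = [] := by
          rw [List.eq_nil_iff_forall_not_mem]
          intro j hj
          obtain ⟨k, hk, rfl, hksp⟩ := (pvMemSpaces' name.toList j).mp hj
          by_cases hle : k ≤ name.toList.length / 2
          · exact hLnone k hle hksp
          · exact hRnone k (by omega) hksp
        rw [if_pos hempty]
      · -- only right
        obtain ⟨rN, hrNge, hReq, hRsp, hRmin⟩ :=
          pvRightCharPos name.toList (name.toList.length / 2) (by omega) hR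
        have hrn : rN < name.toList.length := by
          by_contra hge
          rw [List.getElem?_eq_none (by omega)] at hRsp
          simp at hRsp
        rw [hReq]
        rw [if_neg (by omega)]
        rw [if_pos (Or.inl rfl)]
        have hmem : ((rN : Int)) ∈ pvSpaces name.toList :=
          (pvMemSpaces' name.toList _).mpr ⟨rN, hrn, rfl, hRsp⟩
        rw [if_neg (List.ne_nil_of_mem hmem)]
        rw [pvMinSpaces name.toList _ _ hmem ?_]
        intro y hy
        obtain ⟨k, hk, rfl, hksp⟩ := (pvMemSpaces' name.toList y).mp hy
        have hkr : rN ≤ k := by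
          by_contra hlt
          by_cases hle : k ≤ name.toList.length / 2
          · exact hLnone k hle hksp
          · exact hRmin k (by omega) (by omega) hksp
        constructor
        · rw [pvAbsEval, pvAbsEval]; split_ifs <;> omega
        · intro _; omega
    · -- left = lN
      rw [hLeq]
      by_cases hR : PySem.Chars.findFrom name.toList [' '] ((name.toList.length / 2 : Nat) : Int) none = -1
      · -- only left
        have hRnone := pvRightCharNeg name.toList (name.toList.length / 2) (by omega) hR
        rw [hR]
        rw [if_neg (by omega)]
        rw [if_neg (by omega)]
        have hln : lN < name.toList.length := by omega
        have hmem : ((lN : Int)) ∈ pvSpaces name.toList :=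
          (pvMemSpaces' name.toList _).mpr ⟨lN, hln, rfl, hLsp⟩
        rw [if_neg (List.ne_nil_of_mem hmem)]
        rw [pvMinSpaces name.toList _ _ hmem ?_]
        intro y hy
        obtain ⟨k, hk, rfl, hksp⟩ := (pvMemSpaces' name.toList y).mp hy
        have hkl : k ≤ lN := by
          by_contra hgt
          by_cases hle : k ≤ name.toList.length / 2
          · exact hLmax k (by omega) hle hksp
          · exact hRnone k (by omega) hksp
        constructor
        · rw [pvAbsEval, pvAbsEval]; split_ifs <;> omega
        · intro h1; rw [pvAbsEval, pvAbsEval] at h1; revert h1; split_ifs <;> omega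
      · -- both exist
        obtain ⟨rN, hrNge, hReq, hRsp, hRmin⟩ :=
          pvRightCharPos name.toList (name.toList.length / 2) (by omega) hR
        have hrn : rN < name.toList.length := by
          by_contra hge
          rw [List.getElem?_eq_none (by omega)] at hRsp
          simp at hRsp
        rw [hReq]
        rw [if_neg (by omega)]
        by_cases hcmp : ((rN : Int)) - ((name.toList.length / 2 : Nat) : Int) <
            ((name.toList.length / 2 : Nat) : Int) - ((lN : Int))
        · -- closer right
          rw [if_pos (Or.inr ⟨by omega, hcmp⟩)]
          have hmem : ((rN : Int)) ∈ pvSpaces name.toList :=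
            (pvMemSpaces' name.toList _).mpr ⟨rN, hrn, rfl, hRsp⟩
          rw [if_neg (List.ne_nil_of_mem hmem)]
          rw [pvMinSpaces name.toList _ _ hmem ?_]
          intro y hy
          obtain ⟨k, hk, rfl, hksp⟩ := (pvMemSpaces' name.toList y).mp hy
          have hkd : k ≤ lN ∨ rN ≤ k := by
            by_contra hno
            push_neg at hno
            by_cases hle : k ≤ name.toList.length / 2
            · exact hLmax k (by omega) hle hksp
            · exact hRmin k (by omega) (by omega) hksp
          constructor
          · rw [pvAbsEval, pvAbsEval]; split_ifs <;> omega
          · intro h1; rw [pvAbsEval, pvAbsEval] at h1; revert h1; split_ifs <;> omega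
        · -- left wins (tie or closer)
          rw [if_neg (by push_neg; exact ⟨by omega, fun _ => by omega⟩)]
          have hln : lN < name.toList.length := by omega
          have hmem : ((lN : Int)) ∈ pvSpaces name.toList :=
            (pvMemSpaces' name.toList _).mpr ⟨lN, hln, rfl, hLsp⟩
          rw [if_neg (List.ne_nil_of_mem hmem)]
          rw [pvMinSpaces name.toList _ _ hmem ?_]
          intro y hy
          obtain ⟨k, hk, rfl, hksp⟩ := (pvMemSpaces' name.toList y).mp hy
          have hkd : k ≤ lN ∨ rN ≤ k := by
            by_contra hno
            push_neg at hno
            by_cases hle : k ≤ name.toList.length / 2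
            · exact hLmax k (by omega) hle hksp
            · exact hRmin k (by omega) (by omega) hksp
          constructor
          · rw [pvAbsEval, pvAbsEval]; split_ifs <;> omega
          · intro h1; rw [pvAbsEval, pvAbsEval] at h1; revert h1; split_ifs <;> omega


theorem pvFoldlEq (l : List (String × Int)) (acc : List (String × Int)) :
    l.foldl pvStepA acc = acc ++ l.map (fun t => (pvFmtB t.1, t.2)) := by
  induction l generalizing acc with
  | nil => simp
  | cons x xs ih => simp [pvStepEq, ih]


-- ===== VERDICT (by name: the statement is the Claim_ definition above) =====
theorem break_names_py_spec : Claim_equal_break_names_py := by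
  intro l _
  show break_names_py l = break_names_py_alt l
  simpa [break_names_py, break_names_py_alt] using pvFoldlEq l []
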